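-- pv_equiv track=rewrite | github.com/mosake/OpenExo_mirror | deliverable3/Application/databasecmp/databasecmp.py | check_repetitions
-- ===== SOURCE A (Python) =====
-- def check_repetitions(current_database, new_database, find="planet"):
--     index = None
--     current_files = []
--     new_files = []
--
--     if find == "system":
--         index = 0
--     elif find == "star":
--         index = 1
--     elif find == "planet":
--         index = 2
--     elif find == "bplanet":
--         index = 3
--     else:
--         return None
--
--     for key in current_database:
--         for i in key[index]:
--             for key2 in new_database:
--                 # check if filenames repeat
--                 if key == key2:
--                     current_files.append(key)
--                     new_files.append(key2)
--                 else:
--                     for j in key2[index]: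
--                         if i == j:
--                             current_files.append(key)
--                             new_files.append(key2)
--                             break
--     return (current_files, new_files)
-- ===== SOURCE B (Python) =====
-- def _merge(a, b):
--     # union of two strictly increasing int lists, kept sorted
--     out = []
--     p = q = 0
--     while p < len(a) and q < len(b):
--         if a[p] < b[q]:
--             out.append(a[p]); p += 1
--         elif b[q] < a[p]:
--             out.append(b[q]); q += 1
--         else:
--             out.append(a[p]); p += 1; q += 1
--     out.extend(a[p:])
--     out.extend(b[q:])
--     return out
--
--
-- def check_repetitions(current_database, new_database, find="planet"):
--     indices = {"system": 0, "star": 1, "planet": 2, "bplanet": 3}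
--     if find not in indices:
--         return None
--     index = indices[find]
--
--     # one pass over new_database: positions of each value, and of each whole entry
--     val_pos = {}
--     eq_pos = {}
--     for j, entry in enumerate(new_database):
--         eq_pos.setdefault(tuple(map(tuple, entry)), []).append(j)
--         if len(entry) > index:        # totality guard; entries reached by A always satisfy it
--             for v in dict.fromkeys(entry[index]):
--                 val_pos.setdefault(v, []).append(j)
--
--     current_files = []
--     new_files = []
--     for key in current_database:
--         eq = eq_pos.get(tuple(map(tuple, key)), [])
--         for i in key[index]:
--             for j in _merge(eq, val_pos.get(i, [])):
--                 current_files.append(key)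
--                 new_files.append(new_database[j])
--     return (current_files, new_files)
-- ===== Notes on version B (the rewrite author's own statement) =====
-- stated objective: alternative
-- what changed: Replaces A's quadruple nested scan (for each current entry and each of its attribute values, rescan all of new_database and each candidate's attribute list) by one indexing pass over new_database building value->positions and entry->positions maps, then answering each (entry, value) query by a sorted merge-union of the two precomputed position lists.
import Mathlib
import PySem

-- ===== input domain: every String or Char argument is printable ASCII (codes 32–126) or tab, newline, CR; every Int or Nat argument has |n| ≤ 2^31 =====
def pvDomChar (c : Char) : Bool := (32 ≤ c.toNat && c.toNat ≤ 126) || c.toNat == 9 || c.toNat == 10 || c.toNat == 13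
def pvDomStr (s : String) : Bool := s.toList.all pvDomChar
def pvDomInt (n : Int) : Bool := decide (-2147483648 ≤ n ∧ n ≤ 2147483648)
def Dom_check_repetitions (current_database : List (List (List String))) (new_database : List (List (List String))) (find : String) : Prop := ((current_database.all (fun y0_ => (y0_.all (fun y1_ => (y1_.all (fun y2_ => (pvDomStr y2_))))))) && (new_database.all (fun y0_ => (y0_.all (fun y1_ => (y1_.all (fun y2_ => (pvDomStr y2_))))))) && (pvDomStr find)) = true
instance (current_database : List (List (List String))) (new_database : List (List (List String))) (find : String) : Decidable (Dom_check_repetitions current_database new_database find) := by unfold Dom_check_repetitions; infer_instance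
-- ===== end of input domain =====

-- B replaces A's quadruple nested scan by a single indexing pass over new_database
-- (value -> sorted positions, entry -> sorted positions) plus a sorted merge-union per
-- (entry, value) pair: a different algorithm with the same return value wherever A returns.

-- ===== PORT A =====
-- 'for j in key2[index]: if i == j: … break' — the scan stops at the first hit
def pvAFindJ (i : String) : List String → Bool
  | [] => false
  | j :: rest => if i == j then true else pvAFindJ i rest

-- key2[index]; inside Pre_ the index is in range wherever this is reached (Python raises IndexError otherwise)
def pvAStep (index : Int) (key : List (List String)) (i : String)
    (st : List (List (List String)) × List (List (List String)))
    (key2 : List (List String)) :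
    List (List (List String)) × List (List (List String)) :=
  if key == key2 then (st.1 ++ [key], st.2 ++ [key2])
  else if pvAFindJ i (PySem.List.pyGetD key2 index []) then (st.1 ++ [key], st.2 ++ [key2])
  else st

def check_repetitions (current_database : List (List (List String))) (new_database : List (List (List String))) (find : String) : Option (List (List (List String)) × List (List (List String))) :=
  let index? : Option Int :=
    if find == "system" then some 0
    else if find == "star" then some 1
    else if find == "planet" then some 2
    else if find == "bplanet" then some 3
    else none
  match index? with
  | none => none
  | some index =>
    some (current_database.foldl (fun st key =>
      (PySem.List.pyGetD key index []).foldl (fun st i =>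
        new_database.foldl (fun st key2 => pvAStep index key i st key2) st) st) ([], []))

-- ===== PORT B =====
-- merge-union of two strictly increasing position lists (Source B's _merge while-loop;
-- the fuel a.length + b.length is exactly the number of iterations the loop can make)
def pvMergeFuel : Nat → List Int → List Int → List Int
  | 0, a, b => a ++ b
  | _ + 1, [], b => b
  | _ + 1, a, [] => a
  | n + 1, x :: xs, y :: ys =>
    if x < y then x :: pvMergeFuel n xs (y :: ys)
    else if y < x then y :: pvMergeFuel n (x :: xs) ys
    else x :: pvMergeFuel n xs ys

def pvMerge (a b : List Int) : List Int := pvMergeFuel (a.length + b.length) a b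

-- one enumerate step of Source B's indexing pass: record the entry's position under the whole
-- entry (eq_pos) and under each distinct value of entry[index] (val_pos, guarded by length)
def pvBuildStep (index : Int)
    (st : PySem.Dict String (List Int) × PySem.Dict (List (List String)) (List Int))
    (je : Int × List (List String)) :
    PySem.Dict String (List Int) × PySem.Dict (List (List String)) (List Int) :=
  (if index < (je.2.length : Int) then
     (PySem.List.dedup (PySem.List.pyGetD je.2 index [])).foldl
       (fun vp v => vp.insert v (vp.getD v [] ++ [je.1])) st.1
   else st.1,
   st.2.insert je.2 (st.2.getD je.2 [] ++ [je.1]))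

def check_repetitions_alt (current_database : List (List (List String))) (new_database : List (List (List String))) (find : String) : Option (List (List (List String)) × List (List (List String))) :=
  let indices : PySem.Dict String Int :=
    (((PySem.Dict.empty.insert "system" 0).insert "star" 1).insert "planet" 2).insert "bplanet" 3
  match indices.get? find with
  | none => none
  | some index =>
    let built := (PySem.List.enumerate new_database).foldl (pvBuildStep index)
      (PySem.Dict.empty, PySem.Dict.empty)
    some (current_database.foldl (fun st key =>
      let eq := built.2.getD key []
      (PySem.List.pyGetD key index []).foldl (fun st i =>
        (pvMerge eq (built.1.getD i [])).foldl
          (fun st j => (st.1 ++ [key], st.2 ++ [PySem.List.pyGetD new_database j []])) st) st) ([], []))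

-- ===== PRECONDITION & SPEC =====
-- the attribute index named by find, if any (used only by Pre_/Raises_)
def pvIndexOf (find : String) : Option Int :=
  if find = "system" then some 0
  else if find = "star" then some 1
  else if find = "planet" then some 2
  else if find = "bplanet" then some 3
  else none

-- Pre_ excludes exactly the inputs on which the Python A raises IndexError: a current entry
-- shorter than index+1, or a current entry with a nonempty attribute list meeting a distinct
-- new entry shorter than index+1.
def Pre_check_repetitions (current_database : List (List (List String))) (new_database : List (List (List String))) (find : String) : Prop :=
  ∀ index ∈ pvIndexOf find, ∀ k ∈ current_database,
    index < (k.length : Int) ∧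
      (PySem.List.pyGetD k index [] ≠ [] →
        ∀ k2 ∈ new_database, k2 = k ∨ index < (k2.length : Int))
instance (current_database : List (List (List String))) (new_database : List (List (List String))) (find : String) : Decidable (Pre_check_repetitions current_database new_database find) := by unfold Pre_check_repetitions; infer_instance

def pvWitness_check_repetitions : List (List (List String)) × List (List (List String)) × String :=
  ([[["s"], ["t"], ["a", "b"], ["c"]]], [[["s"], ["u"], ["b"], ["d"]]], "planet")

def Spec_check_repetitions (current_database : List (List (List String))) (new_database : List (List (List String))) (find : String) (out : Option (List (List (List String)) × List (List (List String)))) : Prop := out = check_repetitions_alt current_database new_database find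
instance (current_database : List (List (List String))) (new_database : List (List (List String))) (find : String) (out : Option (List (List (List String)) × List (List (List String)))) : Decidable (Spec_check_repetitions current_database new_database find out) := by unfold Spec_check_repetitions; infer_instance

-- ===== CLAIM (what is proved, stated in full; the proofs are below) =====
def Claim_equal_check_repetitions : Prop := ∀ (current_database : List (List (List String))) (new_database : List (List (List String))) (find : String), Dom_check_repetitions current_database new_database find → Pre_check_repetitions current_database new_database find → Spec_check_repetitions current_database new_database find (check_repetitions current_database new_database find)

-- ===== LEMMAS AND PROOFS =====

theorem pvAFindJ_eq_mem (i : String) (l : List String) :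
    pvAFindJ i l = decide (i ∈ l) := by
  induction l with
  | nil => simp [pvAFindJ]
  | cons j rest ih =>
    simp only [pvAFindJ, ih]
    by_cases h : i = j <;> simp [h]

theorem pvMergeFuel_mono (n : Nat) : ∀ (m : Nat) (a b : List Int),
    a.length + b.length ≤ n → a.length + b.length ≤ m →
    pvMergeFuel n a b = pvMergeFuel m a b := by
  induction n with
  | zero =>
    intro m a b hn _
    cases a with
    | nil =>
      cases b with
      | nil => cases m <;> rfl
      | cons y ys => simp at hn
    | cons x xs => simp at hn
  | succ n ih =>
    intro m a b hn hm
    cases a with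
    | nil =>
      cases m with
      | zero =>
        cases b with
        | nil => rfl
        | cons y ys => simp at hm
      | succ m => rfl
    | cons x xs =>
      cases b with
      | nil =>
        cases m with
        | zero => simp at hm
        | succ m => rfl
      | cons y ys =>
        cases m with
        | zero => simp at hm
        | succ m =>
          simp only [List.length_cons] at hn hm
          simp only [pvMergeFuel]
          split_ifs
          · exact congrArg (x :: ·) (ih m xs (y :: ys)
              (by simp only [List.length_cons]; omega) (by simp only [List.length_cons]; omega))
          · exact congrArg (y :: ·) (ih m (x :: xs) ys
              (by simp only [List.length_cons]; omega) (by simp only [List.length_cons]; omega))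
          · exact congrArg (x :: ·) (ih m xs ys (by omega) (by omega))

theorem pvMerge_nil_left (b : List Int) : pvMerge [] b = b := by
  cases b <;> rfl

theorem pvMerge_nil_right (a : List Int) : pvMerge a [] = a := by
  cases a <;> rfl

theorem pvMerge_cons_cons (x y : Int) (xs ys : List Int) :
    pvMerge (x :: xs) (y :: ys)
      = if x < y then x :: pvMerge xs (y :: ys)
        else if y < x then y :: pvMerge (x :: xs) ys
        else x :: pvMerge xs ys := by
  show pvMergeFuel ((xs.length + 1 + ys.length) + 1) _ _ = _
  simp only [pvMergeFuel]
  split_ifs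
  · exact congrArg (x :: ·) (pvMergeFuel_mono _ _ _ _
      (by simp only [List.length_cons]; omega) (by simp only [List.length_cons]; omega))
  · exact congrArg (y :: ·) (pvMergeFuel_mono _ _ _ _
      (by simp only [List.length_cons]; omega) (by simp only [List.length_cons]; omega))
  · exact congrArg (x :: ·) (pvMergeFuel_mono _ _ _ _
      (by omega) (by omega))

theorem pvMerge_cons_left (x : Int) (a b : List Int) (h : ∀ y ∈ b, x < y) :
    pvMerge (x :: a) b = x :: pvMerge a b := by
  cases b with
  | nil => simp [pvMerge_nil_right]
  | cons y ys => simp [pvMerge_cons_cons, h y (by simp)]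

theorem pvMerge_cons_right (y : Int) (a b : List Int) (h : ∀ x ∈ a, y < x) :
    pvMerge a (y :: b) = y :: pvMerge a b := by
  cases a with
  | nil => simp [pvMerge_nil_left]
  | cons x xs =>
    have hx : y < x := h x (by simp)
    simp [pvMerge_cons_cons, hx, not_lt_of_gt hx]

theorem pvMerge_filter {α : Type} (E : List (Int × α)) (P Q : Int × α → Bool)
    (hp : E.Pairwise (fun p q => p.1 < q.1)) :
    pvMerge ((E.filter P).map (·.1)) ((E.filter Q).map (·.1))
      = (E.filter (fun x => P x || Q x)).map (·.1) := by
  induction E with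
  | nil => simp [pvMerge_nil_left]
  | cons a t ih =>
    have hlt : ∀ b ∈ t, a.1 < b.1 := (List.pairwise_cons.mp hp).1
    have hpt := (List.pairwise_cons.mp hp).2
    by_cases hP : P a = true <;> by_cases hQ : Q a = true
    · simp only [List.filter_cons, hP, hQ, if_true, List.map_cons, Bool.true_or]
      rw [pvMerge_cons_cons]
      simp only [lt_irrefl, if_false]
      exact congrArg (a.1 :: ·) (ih hpt)
    · simp only [List.filter_cons, hP, hQ, if_true, List.map_cons, Bool.true_or]
      rw [pvMerge_cons_left]
      · exact congrArg (a.1 :: ·) (ih hpt)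
      · intro y hy
        obtain ⟨b, hb, rfl⟩ := List.mem_map.mp hy
        exact hlt b (List.mem_of_mem_filter hb)
    · simp only [List.filter_cons, hP, hQ, if_true, List.map_cons, Bool.false_or]
      rw [pvMerge_cons_right]
      · exact congrArg (a.1 :: ·) (ih hpt)
      · intro x hx
        obtain ⟨b, hb, rfl⟩ := List.mem_map.mp hx
        exact hlt b (List.mem_of_mem_filter hb)
    · simp only [List.filter_cons, hP, hQ, Bool.false_or]
      exact ih hpt

-- eq_pos after the indexing pass: the positions whose entry equals k, in order
theorem pvBuild_eq (index : Int) (E : List (Int × List (List String)))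
    (st : PySem.Dict String (List Int) × PySem.Dict (List (List String)) (List Int))
    (k : List (List String)) :
    ((E.foldl (pvBuildStep index) st).2).getD k []
      = st.2.getD k [] ++ (E.filter (fun je => je.2 == k)).map (·.1) := by
  induction E generalizing st with
  | nil => simp
  | cons je t ih =>
    simp only [List.foldl_cons, ih, List.filter_cons]
    by_cases h : je.2 = k
    · subst h
      simp [pvBuildStep]
    · simp [pvBuildStep, PySem.Dict.getD_insert, h, Ne.symm h, beq_iff_eq]

-- one entry's inner loop over its distinct values
theorem pvValInner (j : Int) (v : String) (L : List String) :
    L.Nodup → ∀ vp : PySem.Dict String (List Int),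
    (L.foldl (fun vp v => vp.insert v (vp.getD v [] ++ [j])) vp).getD v []
      = if v ∈ L then vp.getD v [] ++ [j] else vp.getD v [] := by
  induction L with
  | nil => intro _ vp; simp
  | cons w t ih =>
    intro hnd vp
    have hnd' : t.Nodup := (List.nodup_cons.mp hnd).2
    have hw : w ∉ t := (List.nodup_cons.mp hnd).1
    simp only [List.foldl_cons, ih hnd']
    by_cases h : v = w
    · subst h
      simp [hw]
    · simp [PySem.Dict.getD_insert, h, List.mem_cons]

-- val_pos after the indexing pass: the positions whose (long enough) entry contains v, in order
theorem pvBuild_val (index : Int) (E : List (Int × List (List String)))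
    (st : PySem.Dict String (List Int) × PySem.Dict (List (List String)) (List Int))
    (v : String) :
    ((E.foldl (pvBuildStep index) st).1).getD v []
      = st.1.getD v [] ++ (E.filter (fun je =>
          decide (index < (je.2.length : Int)) &&
            decide (v ∈ PySem.List.dedup (PySem.List.pyGetD je.2 index [])))).map (·.1) := by
  induction E generalizing st with
  | nil => simp
  | cons je t ih =>
    simp only [List.foldl_cons, ih, List.filter_cons, pvBuildStep]
    by_cases hlen : index < (je.2.length : Int)
    · rw [if_pos hlen, pvValInner je.1 v _ (PySem.List.nodup_dedup _) st.1]
      by_cases hv : v ∈ PySem.List.dedup (PySem.List.pyGetD je.2 index [])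
      · rw [if_pos hv]
        simp only [hv, hlen, decide_true, Bool.and_self, if_pos,
          List.map_cons, List.append_assoc, List.singleton_append]
      · rw [if_neg hv]
        simp only [hv, hlen, decide_true, decide_false, Bool.and_false,
          Bool.false_eq_true, if_false]
    · rw [if_neg hlen]
      simp only [hlen, decide_false, Bool.false_and, Bool.false_eq_true, if_false]

-- A's scan over new_database for one (key, i)
theorem pvAStep_eq (index : Int) (key : List (List String)) (i : String)
    (st : List (List (List String)) × List (List (List String))) (k2 : List (List String)) :
    pvAStep index key i st k2
      = if (key == k2 || pvAFindJ i (PySem.List.pyGetD k2 index [])) then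
          (st.1 ++ [key], st.2 ++ [k2])
        else st := by
  unfold pvAStep
  by_cases he : (key == k2) = true
  · have hk : key = k2 := beq_iff_eq.mp he
    subst hk
    simp
  · by_cases hf : pvAFindJ i (PySem.List.pyGetD k2 index []) = true <;> simp [he, hf]

theorem pvAInner (index : Int) (key : List (List String)) (i : String)
    (new_database : List (List (List String)))
    (st : List (List (List String)) × List (List (List String))) :
    new_database.foldl (fun st key2 => pvAStep index key i st key2) st
      = (st.1 ++ (new_database.filter (fun k2 =>
            key == k2 || pvAFindJ i (PySem.List.pyGetD k2 index []))).map (fun _ => key),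
         st.2 ++ new_database.filter (fun k2 =>
            key == k2 || pvAFindJ i (PySem.List.pyGetD k2 index []))) := by
  induction new_database generalizing st with
  | nil => simp
  | cons k2 t ih =>
    rw [List.foldl_cons, pvAStep_eq, List.filter_cons]
    by_cases hc : (key == k2 || pvAFindJ i (PySem.List.pyGetD k2 index [])) = true
    · rw [if_pos hc, if_pos hc, ih]
      simp
    · rw [if_neg hc, if_neg hc, ih]

-- B's positions fold, rewritten over the filtered enumerate list itself
theorem pvBInner (key : List (List String)) (new_database : List (List (List String)))
    (F : List (Int × List (List String)))
    (hget : ∀ je ∈ F, PySem.List.pyGetD new_database je.1 [] = je.2)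
    (st : List (List (List String)) × List (List (List String))) :
    (F.map (·.1)).foldl
        (fun st j => (st.1 ++ [key], st.2 ++ [PySem.List.pyGetD new_database j []])) st
      = (st.1 ++ F.map (fun _ => key), st.2 ++ F.map (·.2)) := by
  induction F generalizing st with
  | nil => simp
  | cons je t ih =>
    simp only [List.map_cons, List.foldl_cons]
    rw [hget je (by simp), ih (fun x hx => hget x (by simp [hx]))]
    simp

theorem pvEnum_get (new_database : List (List (List String)))
    (je : Int × List (List String)) (h : je ∈ PySem.List.enumerate new_database) :
    PySem.List.pyGetD new_database je.1 [] = je.2 := by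
  obtain ⟨k, hk, rfl⟩ := (PySem.List.mem_enumerate_iff _ _ _).mp h
  simp [PySem.List.pyGetD_natCast, List.getD_eq_getElem?_getD, hk]

-- the two match predicates agree entry by entry (for a nonnegative index)
theorem pvPred_eq (index : Int) (h0 : 0 ≤ index) (key k2 : List (List String)) (i : String) :
    ((k2 == key)
      || (decide (index < (k2.length : Int)) &&
            decide (i ∈ PySem.List.dedup (PySem.List.pyGetD k2 index []))))
    = (key == k2 || pvAFindJ i (PySem.List.pyGetD k2 index [])) := by
  rw [pvAFindJ_eq_mem]
  by_cases hlen : index < (k2.length : Int)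
  · simp [hlen, BEq.comm]
  · have : PySem.List.pyGetD k2 index [] = [] := by
      rw [PySem.List.pyGetD_of_nonneg _ _ h0]
      exact List.getD_eq_default _ _ (by omega)
    simp [hlen, this, BEq.comm]

-- the whole some-branch for one nonnegative index
theorem pvMain (index : Int) (h0 : 0 ≤ index)
    (current_database new_database : List (List (List String))) :
    (current_database.foldl (fun st key =>
      (PySem.List.pyGetD key index []).foldl (fun st i =>
        new_database.foldl (fun st key2 => pvAStep index key i st key2) st) st) ([], []))
    = (let built := (PySem.List.enumerate new_database).foldl (pvBuildStep index)
          (PySem.Dict.empty, PySem.Dict.empty)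
       current_database.foldl (fun st key =>
        let eq := built.2.getD key []
        (PySem.List.pyGetD key index []).foldl (fun st i =>
          (pvMerge eq (built.1.getD i [])).foldl
            (fun st j => (st.1 ++ [key], st.2 ++ [PySem.List.pyGetD new_database j []])) st) st)
        ([], [])) := by
  apply PySem.List.foldl_congr_mem
  intro st key _
  apply PySem.List.foldl_congr_mem
  intro st' i _
  -- rewrite B's side
  rw [pvBuild_eq, pvBuild_val]
  simp only [PySem.Dict.getD_empty, List.nil_append]
  rw [pvMerge_filter _ _ _ (PySem.List.pairwise_lt_enumerate _ _)]
  rw [pvBInner key new_database _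
    (fun je hje => pvEnum_get _ _ (List.mem_of_mem_filter hje)) st']
  rw [pvAInner]
  have hpred : (PySem.List.enumerate new_database).filter (fun je =>
        (je.2 == key) || (decide (index < (je.2.length : Int)) &&
          decide (i ∈ PySem.List.dedup (PySem.List.pyGetD je.2 index []))))
      = (PySem.List.enumerate new_database).filter (fun je =>
          (key == je.2 || pvAFindJ i (PySem.List.pyGetD je.2 index []))) := by
    apply List.filter_congr
    intro je _
    exact pvPred_eq index h0 key je.2 i
  rw [hpred]
  have hsnd : ((PySem.List.enumerate new_database).filter (fun je =>
        (key == je.2 || pvAFindJ i (PySem.List.pyGetD je.2 index [])))).map (·.2)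
      = new_database.filter (fun k2 =>
          key == k2 || pvAFindJ i (PySem.List.pyGetD k2 index [])) := by
    conv_rhs => rw [← PySem.List.map_snd_enumerate new_database 0, List.filter_map]
    rfl
  have hfst : ((PySem.List.enumerate new_database).filter (fun je =>
        (key == je.2 || pvAFindJ i (PySem.List.pyGetD je.2 index [])))).map (fun _ => key)
      = (new_database.filter (fun k2 =>
          key == k2 || pvAFindJ i (PySem.List.pyGetD k2 index []))).map (fun _ => key) := by
    rw [← hsnd, List.map_map]
    rfl
  rw [hfst, hsnd]

-- ===== VERDICT (by name: the statement is the Claim_ definition above) =====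
theorem check_repetitions_spec : Claim_equal_check_repetitions := by
  intro current_database new_database find _ _
  unfold Spec_check_repetitions check_repetitions check_repetitions_alt
  by_cases h1 : find = "system"
  · subst h1; simp [pvMain 0 (by norm_num), PySem.Dict.get?_insert]
  · by_cases h2 : find = "star"
    · subst h2; simp [pvMain 1 (by norm_num), PySem.Dict.get?_insert]
    · by_cases h3 : find = "planet"
      · subst h3; simp [pvMain 2 (by norm_num), PySem.Dict.get?_insert]
      · by_cases h4 : find = "bplanet"
        · subst h4; simp [pvMain 3 (by norm_num)]
        · simp [h1, h2, h3, h4, PySem.Dict.get?_insert, PySem.Dict.get?_empty,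
            beq_iff_eq]
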